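-- pv_equiv track=rewrite | github.com/computor-org/computor-backend | computor-backend/src/computor_backend/repositories/view_base.py | _aggregate_grading_status
-- ===== SOURCE A (Python) =====
-- from typing import Any, Optional, Dict, List
--
-- def _aggregate_grading_status(statuses: List[str]) -> Optional[str]:
--     """
--     Aggregate multiple grading statuses following priority rules.
--
--     Rules:
--     1. If ANY 'correction_necessary' exists -> 'correction_necessary'
--     2. Else if ANY 'improvement_possible' exists -> 'improvement_possible'
--     3. Else if ALL are 'corrected' -> 'corrected'
--     4. Else -> 'not_reviewed' (mix of corrected/not_reviewed, or all not_reviewed, or empty)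
--
--     Args:
--         statuses: List of grading status strings (can include None values)
--
--     Returns:
--         Aggregated status string, or None if no valid statuses
--     """
--     # Filter out None values
--     valid_statuses = [s for s in statuses if s is not None]
--
--     if not valid_statuses:
--         return None
--
--     # Check for correction_necessary (highest priority)
--     if "correction_necessary" in valid_statuses:
--         return "correction_necessary"
--
--     # Check for improvement_possible
--     if "improvement_possible" in valid_statuses:
--         return "improvement_possible"
--
--     # Check if ALL are corrected
--     if all(s == "corrected" for s in valid_statuses):
--         return "corrected"
--
--     # Default: not_reviewed (mix or all not_reviewed)
--     return "not_reviewed"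
-- ===== SOURCE B (Python) =====
-- from typing import Optional, List
--
-- def _aggregate_grading_status(statuses: List[str]) -> Optional[str]:
--     saw_valid = saw_cn = saw_ip = False
--     all_corrected = True
--     for s in statuses:
--         if s is None:
--             continue
--         saw_valid = True
--         if s == "correction_necessary":
--             saw_cn = True
--         elif s == "improvement_possible":
--             saw_ip = True
--         if s != "corrected":
--             all_corrected = False
--     if not saw_valid:
--         return None
--     if saw_cn:
--         return "correction_necessary"
--     if saw_ip:
--         return "improvement_possible"
--     if all_corrected:
--         return "corrected"
--     return "not_reviewed"
-- ===== Notes on version B (the rewrite author's own statement) =====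
-- stated objective: simpler
-- what changed: Replaces the filter pass plus two membership scans and an all() scan (up to four traversals) with a single loop maintaining four boolean flags, followed by the same priority ladder.
import Mathlib
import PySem

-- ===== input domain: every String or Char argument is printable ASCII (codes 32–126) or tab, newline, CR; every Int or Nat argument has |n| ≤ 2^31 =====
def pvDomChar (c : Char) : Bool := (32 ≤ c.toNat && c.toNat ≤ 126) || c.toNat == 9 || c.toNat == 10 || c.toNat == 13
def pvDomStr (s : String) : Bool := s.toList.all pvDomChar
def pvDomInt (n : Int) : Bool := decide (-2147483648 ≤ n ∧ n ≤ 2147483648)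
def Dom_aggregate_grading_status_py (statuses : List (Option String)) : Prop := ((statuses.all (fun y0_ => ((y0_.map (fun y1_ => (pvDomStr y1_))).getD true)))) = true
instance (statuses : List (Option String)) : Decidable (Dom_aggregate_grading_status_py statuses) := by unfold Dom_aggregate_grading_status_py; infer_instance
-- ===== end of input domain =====

-- B: one pass maintaining four boolean flags instead of a filter pass plus repeated scans (same values everywhere).
-- ===== PORT A =====
def aggregate_grading_status_py (statuses : List (Option String)) : Option String :=
  let valid_statuses := statuses.filterMap id
  if valid_statuses = [] then none
  else if valid_statuses.contains "correction_necessary" then some "correction_necessary"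
  else if valid_statuses.contains "improvement_possible" then some "improvement_possible"
  else if valid_statuses.all (fun s => s == "corrected") then some "corrected"
  else some "not_reviewed"

-- ===== PORT B =====
def aggStep (st : Bool × Bool × Bool × Bool) (s : Option String) : Bool × Bool × Bool × Bool :=
  match s with
  | none => st
  | some v =>
    (true,
     st.2.1 || (v == "correction_necessary"),
     st.2.2.1 || (!(v == "correction_necessary") && (v == "improvement_possible")),
     st.2.2.2 && (v == "corrected"))

def aggregate_grading_status_py_alt (statuses : List (Option String)) : Option String :=
  let r := statuses.foldl aggStep (false, false, false, true)
  if !r.1 then none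
  else if r.2.1 then some "correction_necessary"
  else if r.2.2.1 then some "improvement_possible"
  else if r.2.2.2 then some "corrected"
  else some "not_reviewed"

-- ===== PRECONDITION & SPEC =====
def Spec_aggregate_grading_status_py (statuses : List (Option String)) (out : Option String) : Prop := out = aggregate_grading_status_py_alt statuses
instance (statuses : List (Option String)) (out : Option String) : Decidable (Spec_aggregate_grading_status_py statuses out) := by unfold Spec_aggregate_grading_status_py; infer_instance

-- ===== CLAIM (what is proved, stated in full; the proofs are below) =====
def Claim_equal_aggregate_grading_status_py : Prop := ∀ (statuses : List (Option String)), Dom_aggregate_grading_status_py statuses → Spec_aggregate_grading_status_py statuses (aggregate_grading_status_py statuses)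

-- ===== LEMMAS AND PROOFS =====

lemma aggStep_foldl (l : List (Option String)) (sv cn ip ac : Bool) :
    l.foldl aggStep (sv, cn, ip, ac) =
      (sv || !(l.filterMap id).isEmpty,
       cn || (l.filterMap id).contains "correction_necessary",
       ip || (l.filterMap id).contains "improvement_possible",
       ac && (l.filterMap id).all (fun s => s == "corrected")) := by
  induction l generalizing sv cn ip ac with
  | nil => simp
  | cons h t ih =>
    cases h with
    | none => simp [aggStep, ih]
    | some v =>
      simp only [List.foldl_cons, List.filterMap_cons, aggStep, ih, id]
      clear ih
      cases h1 : v == "correction_necessary" <;> cases h2 : v == "improvement_possible" <;>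
        cases h3 : v == "corrected" <;>
        (simp_all; try simp [eq_comm, h1, h2])

-- ===== VERDICT (by name: the statement is the Claim_ definition above) =====
theorem aggregate_grading_status_py_spec : Claim_equal_aggregate_grading_status_py := by
  intro statuses _
  unfold Spec_aggregate_grading_status_py aggregate_grading_status_py aggregate_grading_status_py_alt
  rw [aggStep_foldl]
  simp only [Bool.false_or, Bool.true_and, Bool.not_not]
  cases hv : (statuses.filterMap id).isEmpty <;>
    simp_all [List.isEmpty_iff]
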